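-- pv_equiv track=rewrite | github.com/legend-L24/ff_optimizer | sampler/calcfunctions/ff_builder_module.py | check_ff_list
-- ===== SOURCE A (Python) =====
-- def check_ff_list(inp_list):
--     """Check a list of atom types:
--     1) Remove duplicates, preserving the order of the elements.
--     2) Warn if there are atom types with the same name but different parameters
--     3) If a shorter atom type comes later, swap the order # TODO!
--     """
--     out_list = []
--     for item in inp_list:
--         if item.split()[0] not in [x.split()[0] for x in out_list]:  # atom type label is unique
--             out_list.append(item)
--         else:
--             if item in out_list:  # Two atom types are exactly the same
--                 pass
--             else:
--                 raise ValueError('Two atom types with same name but different parameters are used.')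
--     return out_list
-- ===== SOURCE B (Python) =====
-- def check_ff_list(inp_list):
--     groups = {}
--     for item in inp_list:
--         groups.setdefault(item.split()[0], []).append(item)
--     for items in groups.values():
--         for x in items:
--             if x != items[0]:
--                 raise ValueError('Two atom types with same name but different parameters are used.')
--     return [items[0] for items in groups.values()]
-- ===== Notes on version B (the rewrite author's own statement) =====
-- stated objective: faster
-- what changed: Replaces A's per-item rescan of out_list's labels with a single grouping pass into a dict keyed by label (label -> list of items), then a separate conflict-check pass and a final first-of-each-group extraction.
import Mathlib
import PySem

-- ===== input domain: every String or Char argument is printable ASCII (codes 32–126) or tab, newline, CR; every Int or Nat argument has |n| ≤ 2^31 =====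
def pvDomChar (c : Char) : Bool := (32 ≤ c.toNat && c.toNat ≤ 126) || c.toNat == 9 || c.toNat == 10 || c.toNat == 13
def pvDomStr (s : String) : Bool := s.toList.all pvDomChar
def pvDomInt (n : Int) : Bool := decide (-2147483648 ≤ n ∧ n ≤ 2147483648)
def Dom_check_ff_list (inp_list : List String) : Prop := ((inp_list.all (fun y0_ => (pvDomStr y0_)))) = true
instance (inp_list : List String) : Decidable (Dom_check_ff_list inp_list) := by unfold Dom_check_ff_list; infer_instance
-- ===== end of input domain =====

-- B replaces A's per-item rescan of out_list with a dict grouping items by label built in one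
-- pass, then reads the first item of each group (objective: alternative decomposition).
-- item.split()[0] for both programs; "" default is unreachable inside Pre_ (split₀ nonempty there).
def ffLabel (s : String) : String := (PySem.Str.split₀ s).headD ""

-- ===== PORT A =====
def check_ff_list (inp_list : List String) : List String :=
  inp_list.foldl (fun out_list item =>
    if ffLabel item ∉ out_list.map (fun x => ffLabel x) then
      out_list ++ [item]
    else
      if item ∈ out_list then out_list  -- pass
      else out_list)                    -- ValueError in Python: excluded by Pre_
    []

-- ===== PORT B =====
def check_ff_list_alt (inp_list : List String) : List String :=
  let groups := inp_list.foldl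
    (fun g item => g.modify (ffLabel item) [] (fun v => v ++ [item]))  -- setdefault(...,[]).append(item)
    PySem.Dict.empty
  -- the conflict-checking second pass only raises (never inside Pre_); it produces no value
  groups.values.map (fun items => items.headD "")  -- items[0]; groups' values are nonempty by construction

-- ===== PRECONDITION & SPEC =====
-- Pre_ excludes exactly the inputs where Python A raises: an item that is empty/whitespace-only
-- (IndexError on item.split()[0]) or two items with the same label but different full strings (ValueError).
def Pre_check_ff_list (inp_list : List String) : Prop :=
  (∀ s ∈ inp_list, PySem.Str.split₀ s ≠ []) ∧
  (∀ s ∈ inp_list, ∀ t ∈ inp_list, ffLabel s = ffLabel t → s = t)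
instance (inp_list : List String) : Decidable (Pre_check_ff_list inp_list) := by
  unfold Pre_check_ff_list; infer_instance
def pvWitness_check_ff_list : List String := ["CT 1.0 2.0", "HT 0.5 1.5", "CT 1.0 2.0"]

def Spec_check_ff_list (inp_list : List String) (out : List String) : Prop := out = check_ff_list_alt inp_list
instance (inp_list : List String) (out : List String) : Decidable (Spec_check_ff_list inp_list out) := by unfold Spec_check_ff_list; infer_instance

-- ===== CLAIM (what is proved, stated in full; the proofs are below) =====
def Claim_equal_check_ff_list : Prop := ∀ (inp_list : List String), Dom_check_ff_list inp_list → Pre_check_ff_list inp_list → Spec_check_ff_list inp_list (check_ff_list inp_list)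

-- ===== LEMMAS AND PROOFS =====

-- the loop invariant relating A's out_list to B's dict entries
def ffRel (x : String) (p : String × List String) : Prop :=
  p.1 = ffLabel x ∧ p.2.headD "" = x ∧ p.2 ≠ []

theorem ffRel_keys {out : List String} {items : List (String × List String)}
    (h : List.Forall₂ ffRel out items) :
    items.map (·.1) = out.map (fun x => ffLabel x) := by
  induction h with
  | nil => rfl
  | cons hr _ ih => simp [ih, hr.1]

theorem ffRel_values {out : List String} {items : List (String × List String)}
    (h : List.Forall₂ ffRel out items) :
    items.map (fun p => p.2.headD "") = out := by
  induction h with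
  | nil => rfl
  | cons hr _ ih =>
    simp only [List.map_cons, ih, List.cons.injEq, and_true]
    simpa using hr.2.1

theorem headD_append_of_ne_nil {v : List String} (hv : v ≠ []) (w d : String) :
    (v ++ [w]).headD d = v.headD d := by
  cases v with
  | nil => exact absurd rfl hv
  | cons a t => rfl

theorem ffRel_append_one {out : List String} {items : List (String × List String)}
    (h : List.Forall₂ ffRel out items) {x : String} {p : String × List String}
    (hx : ffRel x p) : List.Forall₂ ffRel (out ++ [x]) (items ++ [p]) := by
  induction h with
  | nil => exact List.Forall₂.cons hx List.Forall₂.nil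
  | cons hr _ ih => exact List.Forall₂.cons hr ih

theorem ffRel_map_update {out : List String} {items : List (String × List String)}
    {k item : String} {gval : List String}
    (h : List.Forall₂ ffRel out items)
    (hk : ∀ p ∈ items, p.1 = k → p.2 = gval) :
    List.Forall₂ ffRel out
      (items.map (fun p => if p.1 == k then (k, gval ++ [item]) else p)) := by
  induction h with
  | nil => exact List.Forall₂.nil
  | @cons x p out' items' hr _ ih =>
    simp only [List.map_cons]
    refine List.Forall₂.cons ?_ (ih (fun q hq => hk q (List.mem_cons_of_mem _ hq)))
    by_cases hpk : p.1 = k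
    · have hg : p.2 = gval := hk p (List.mem_cons_self ..) hpk
      simp only [hpk, beq_self_eq_true, if_true]
      refine ⟨by rw [← hpk, hr.1], ?_, by simp⟩
      rw [← hg, headD_append_of_ne_nil hr.2.2]
      exact hr.2.1
    · simp only [beq_iff_eq, hpk, if_false]
      exact hr

theorem ff_loop_eq (l : List String) (out : List String)
    (g : PySem.Dict String (List String))
    (h : List.Forall₂ ffRel out g.items) (hnd : g.keys.Nodup) :
    l.foldl (fun out_list item =>
      if ffLabel item ∉ out_list.map (fun x => ffLabel x) then out_list ++ [item]
      else if item ∈ out_list then out_list else out_list) out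
    = ((l.foldl (fun g item => g.modify (ffLabel item) [] (fun v => v ++ [item])) g).values.map
        (fun items => items.headD "")) := by
  induction l generalizing out g with
  | nil =>
    simp only [List.foldl_nil]
    rw [PySem.Dict.values, List.map_map]
    exact (ffRel_values h).symm
  | cons item rest ih =>
    simp only [List.foldl_cons]
    have hkeys : g.keys = out.map (fun x => ffLabel x) := by
      rw [PySem.Dict.keys]; exact ffRel_keys h
    have hmemiff : ffLabel item ∈ out.map (fun x => ffLabel x) ↔
        g.contains (ffLabel item) = true := by
      rw [PySem.Dict.contains_eq_decide_mem_keys, hkeys, decide_eq_true_iff]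
    by_cases hm : ffLabel item ∈ out.map (fun x => ffLabel x)
    · -- label already present: A keeps out (pass/raise), B overwrites the entry in place
      have hc : g.contains (ffLabel item) = true := hmemiff.mp hm
      have hstepA : (if ffLabel item ∉ out.map (fun x => ffLabel x) then out ++ [item]
          else if item ∈ out then out else out) = out := by
        simp [hm]
      rw [hstepA]
      have hitems : (g.modify (ffLabel item) [] (fun v => v ++ [item])).items
          = g.items.map (fun p => if p.1 == ffLabel item
              then (ffLabel item, g.getD (ffLabel item) [] ++ [item]) else p) := by
        rw [PySem.Dict.modify, PySem.Dict.items_insert_of_contains g _ hc]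
      refine ih out _ ?_ ?_
      · rw [hitems]
        refine ffRel_map_update h (fun p hp hpk => ?_)
        obtain ⟨pk, pv⟩ := p
        subst hpk
        exact (PySem.Dict.getD_of_mem_items g hp hnd []).symm
      · rw [PySem.Dict.modify]; exact PySem.Dict.nodup_keys_insert _ _ _ hnd
    · -- fresh label: A appends the item, B appends a new singleton group
      have hc : g.contains (ffLabel item) = false := by
        cases hcc : g.contains (ffLabel item) with
        | false => rfl
        | true => exact absurd (hmemiff.mpr hcc) hm
      have hstepA : (if ffLabel item ∉ out.map (fun x => ffLabel x) then out ++ [item]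
          else if item ∈ out then out else out) = out ++ [item] := by
        simp only [hm, not_false_iff, if_true]
      rw [hstepA]
      have hitems : (g.modify (ffLabel item) [] (fun v => v ++ [item])).items
          = g.items ++ [(ffLabel item, [item])] := by
        rw [PySem.Dict.modify, PySem.Dict.getD_of_not_contains g _ hc,
          PySem.Dict.items_insert_of_not_contains g _ hc]
        simp
      refine ih (out ++ [item]) _ ?_ ?_
      · rw [hitems]
        exact ffRel_append_one h ⟨rfl, rfl, by simp⟩
      · rw [PySem.Dict.modify]; exact PySem.Dict.nodup_keys_insert _ _ _ hnd

-- ===== VERDICT (by name: the statement is the Claim_ definition above) =====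
theorem check_ff_list_spec : Claim_equal_check_ff_list := by
  intro inp_list _ _
  unfold Spec_check_ff_list check_ff_list check_ff_list_alt
  exact ff_loop_eq inp_list [] PySem.Dict.empty List.Forall₂.nil PySem.Dict.nodup_keys_empty
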